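-- pv_equiv track=rewrite | github.com/jayamehta1/leetcode | majorityElemet.py | majority_frequency_group
-- ===== SOURCE A (Python) =====
-- from collections import Counter, defaultdict
--
-- def majority_frequency_group(s: str) -> str:
--     if not s:
--         return ""
--     cnt = Counter(s)
--     groups = defaultdict(list)
--     for ch, c in cnt.items():
--         groups[c].append(ch)
--     # pick group with max (number of chars, frequency k)
--     best_k, best_chars = max(groups.items(), key=lambda item: (len(item[1]), item[0]))
--     return "".join(best_chars)
-- ===== SOURCE B (Python) =====
-- from collections import Counter
--
-- def majority_frequency_group(s: str) -> str:
--     if not s: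
--         return ""
--     cnt = Counter(s)
--     best_k = best_len = run = 0
--     prev = None
--     for v in sorted(cnt.values()):
--         run = run + 1 if v == prev else 1
--         prev = v
--         if run >= best_len:
--             best_k, best_len = v, run
--     return "".join(ch for ch, c in cnt.items() if c == best_k)
-- ===== Notes on version B (the rewrite author's own statement) =====
-- stated objective: alternative
-- what changed: A groups characters into per-frequency lists in a dict and joins the max group; B never builds frequency groups: it sorts the multiset of counter values and finds the winning frequency by a single run-length scan over the sorted list (equal frequencies are contiguous, ties resolved to the later i.e. larger frequency), then reconstructs the answer with one order-preserving filter over cnt.items().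
import Mathlib
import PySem

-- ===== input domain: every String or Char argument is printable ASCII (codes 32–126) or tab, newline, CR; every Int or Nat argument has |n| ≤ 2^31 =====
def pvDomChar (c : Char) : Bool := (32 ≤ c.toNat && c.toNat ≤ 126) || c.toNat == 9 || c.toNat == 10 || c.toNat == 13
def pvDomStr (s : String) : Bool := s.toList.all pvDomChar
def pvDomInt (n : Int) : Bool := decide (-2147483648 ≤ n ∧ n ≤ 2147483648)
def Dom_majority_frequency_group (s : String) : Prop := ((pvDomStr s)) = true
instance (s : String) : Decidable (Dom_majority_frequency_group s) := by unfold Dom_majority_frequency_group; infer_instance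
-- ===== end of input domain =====

-- B replaces A's dict of per-frequency character lists by sorting the counter's values and
-- finding the winning frequency with a single run-length scan, then one order-preserving
-- filter pass over cnt.items(); alternative decomposition, similar cost.

-- ===== PORT A =====
-- groups chars by frequency, then takes max group by (size, frequency); "".join of 1-char
-- strings is String.ofList of the Char list (exact: every Python element is a 1-char string)
def majority_frequency_group (s : String) : String :=
  if s.toList = [] then ""
  else
    let cnt := PySem.Dict.counter s.toList
    let groups := cnt.items.foldl
      (fun d p => d.modify p.2 ([] : List Char) (fun l => l ++ [p.1]))
      (PySem.Dict.empty : PySem.Dict Int (List Char))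
    -- Python max raises only on an empty sequence, impossible here; the none branch is a totalizer
    match PySem.List.max2? groups.items (fun item => (item.2.length : Int)) (fun item => item.1) with
    | some best => String.ofList best.2
    | none => ""

-- ===== PORT B =====
-- the body of Source B's for-loop over sorted(cnt.values()); state = (best_k, best_len, run, prev)
def pvStep (st : Int × Int × Int × Option Int) (v : Int) : Int × Int × Int × Option Int :=
  let run := if st.2.2.2 = some v then st.2.2.1 + 1 else 1
  if st.2.1 ≤ run then (v, run, run, some v) else (st.1, st.2.1, run, some v)

def majority_frequency_group_alt (s : String) : String :=
  if s.toList = [] then ""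
  else
    let cnt := PySem.Dict.counter s.toList
    let st := (PySem.List.sorted cnt.values (fun v => v) false).foldl pvStep
      (0, 0, 0, (none : Option Int))
    String.ofList ((cnt.items.filter (fun p => p.2 == st.1)).map (fun p => p.1))

-- ===== PRECONDITION & SPEC =====
def Spec_majority_frequency_group (s : String) (out : String) : Prop := out = majority_frequency_group_alt s
instance (s : String) (out : String) : Decidable (Spec_majority_frequency_group s out) := by unfold Spec_majority_frequency_group; infer_instance

-- ===== CLAIM (what is proved, stated in full; the proofs are below) =====
def Claim_equal_majority_frequency_group : Prop := ∀ (s : String), Dom_majority_frequency_group s → Spec_majority_frequency_group s (majority_frequency_group s)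

-- ===== LEMMAS AND PROOFS =====

-- max2? of a nonempty list is some
theorem pv_max2?_isSome {α : Type} (l : List α) (k1 k2 : α → Int) (h : l ≠ []) :
    ∃ m, PySem.List.max2? l k1 k2 = some m := by
  unfold PySem.List.max2?
  cases l with
  | nil => exact absurd rfl h
  | cons x t =>
    rw [List.foldl_cons]
    suffices haux : ∀ (t : List α) (a : α), ∃ m,
        List.foldl (fun acc x =>
          match acc with
          | none => some x
          | some m => if (decide (k1 m < k1 x) || !decide (k1 x < k1 m) && decide (k2 m < k2 x)) = true
              then some x else some m) (some a) t = some m by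
      exact haux t x
    intro t
    induction t with
    | nil => exact fun a => ⟨a, rfl⟩
    | cons y t ih =>
      intro a
      rw [List.foldl_cons]
      simp only
      split_ifs <;> exact ih _

-- the element max2? (with Int keys) returns lexicographically dominates every list element
theorem pv_max2?_dom {α : Type} (l : List α) (k1 k2 : α → Int) (m : α)
    (h : PySem.List.max2? l k1 k2 = some m) :
    ∀ x ∈ l, k1 x < k1 m ∨ (k1 x = k1 m ∧ k2 x ≤ k2 m) := by
  unfold PySem.List.max2? at h
  suffices haux : ∀ (t : List α) (acc : Option α),
      List.foldl (fun acc x =>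
        match acc with
        | none => some x
        | some m => if (decide (k1 m < k1 x) || !decide (k1 x < k1 m) && decide (k2 m < k2 x)) = true
            then some x else some m) acc t = some m →
      (∀ x ∈ t, k1 x < k1 m ∨ (k1 x = k1 m ∧ k2 x ≤ k2 m)) ∧
      (∀ a, acc = some a → k1 a < k1 m ∨ (k1 a = k1 m ∧ k2 a ≤ k2 m)) by
    exact (haux l none h).1
  intro t
  induction t with
  | nil =>
    intro acc h
    refine ⟨by simp, fun a ha => ?_⟩
    rw [List.foldl_nil] at h
    rw [ha] at h
    cases h
    omega
  | cons x t ih =>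
    intro acc h
    rw [List.foldl_cons] at h
    obtain ⟨hmem, hacc⟩ := ih _ h
    have hx : ∀ a, (match acc with
        | none => some x
        | some m => if (decide (k1 m < k1 x) || !decide (k1 x < k1 m) && decide (k2 m < k2 x)) = true
            then some x else some m) = some a →
        k1 a < k1 m ∨ (k1 a = k1 m ∧ k2 a ≤ k2 m) := hacc
    cases acc with
    | none =>
      have hxm := hx x rfl
      refine ⟨fun y hy => ?_, fun a ha => by cases ha⟩
      rcases List.mem_cons.1 hy with rfl | hy
      · exact hxm
      · exact hmem y hy
    | some a =>
      by_cases hc : (decide (k1 a < k1 x) || !decide (k1 x < k1 a) && decide (k2 a < k2 x)) = true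
      · -- a is replaced by x
        have hxm := hx x (by simp only [hc, if_true])
        simp only [Bool.or_eq_true, Bool.and_eq_true, Bool.not_eq_true', decide_eq_true_eq,
          decide_eq_false_iff_not] at hc
        refine ⟨fun y hy => ?_, fun a' ha' => ?_⟩
        · rcases List.mem_cons.1 hy with rfl | hy
          · exact hxm
          · exact hmem y hy
        · cases ha'
          omega
      · -- a survives
        have ham := hx a (by simp [hc])
        simp only [Bool.or_eq_true, Bool.and_eq_true, Bool.not_eq_true', decide_eq_true_eq,
          decide_eq_false_iff_not] at hc
        push Not at hc
        refine ⟨fun y hy => ?_, fun a' ha' => ?_⟩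
        · rcases List.mem_cons.1 hy with rfl | hy
          · omega
          · exact hmem y hy
        · cases ha'
          exact ham

-- the element max2? returns is a member of the list
theorem pv_max2?_mem {α : Type} (l : List α) (k1 k2 : α → Int) (m : α)
    (h : PySem.List.max2? l k1 k2 = some m) : m ∈ l := by
  unfold PySem.List.max2? at h
  suffices haux : ∀ (t : List α) (acc : Option α),
      List.foldl (fun acc x =>
        match acc with
        | none => some x
        | some m => if (decide (k1 m < k1 x) || !decide (k1 x < k1 m) && decide (k2 m < k2 x)) = true
            then some x else some m) acc t = some m → m ∈ t ∨ acc = some m by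
    rcases haux l none h with hm | hm
    · exact hm
    · exact absurd hm (by simp)
  intro t
  induction t with
  | nil => intro acc h; exact Or.inr h
  | cons x t ih =>
    intro acc h
    rcases ih _ h with hm | hm
    · exact Or.inl (List.mem_cons_of_mem _ hm)
    · cases acc with
      | none =>
        simp only [Option.some.injEq] at hm
        exact Or.inl (hm ▸ List.mem_cons_self)
      | some a =>
        simp only at hm
        split_ifs at hm <;> simp only [Option.some.injEq] at hm
        · exact Or.inl (hm ▸ List.mem_cons_self)
        · exact Or.inr (by rw [hm])

-- max with a lexicographic (k1, k2) key commutes with a map when the keys are composed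
theorem pv_max2?_map {α β : Type} (l : List α) (g : α → β) (k1 k2 : β → Int) :
    PySem.List.max2? (l.map g) k1 k2
      = (PySem.List.max2? l (fun x => k1 (g x)) (fun x => k2 (g x))).map g := by
  unfold PySem.List.max2?
  rw [List.foldl_map]
  suffices h : ∀ acc : Option α,
      List.foldl (fun acc x =>
        match acc with
        | none => some (g x)
        | some m => if (decide (k1 m < k1 (g x)) || !decide (k1 (g x) < k1 m) && decide (k2 m < k2 (g x))) = true
            then some (g x) else some m) (acc.map g) l
      = (List.foldl (fun acc x =>
        match acc with
        | none => some x
        | some m => if (decide (k1 (g m) < k1 (g x)) || !decide (k1 (g x) < k1 (g m)) && decide (k2 (g m) < k2 (g x))) = true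
            then some x else some m) acc l).map g by
    simpa using h none
  intro acc
  induction l generalizing acc with
  | nil => simp
  | cons x t ih =>
    rw [List.foldl_cons, List.foldl_cons]
    have hstep :
        (match acc.map g with
          | none => some (g x)
          | some m => if (decide (k1 m < k1 (g x)) || !decide (k1 (g x) < k1 m) && decide (k2 m < k2 (g x))) = true
              then some (g x) else some m)
          = Option.map g (match acc with
          | none => some x
          | some m => if (decide (k1 (g m) < k1 (g x)) || !decide (k1 (g x) < k1 (g m)) && decide (k2 (g m) < k2 (g x))) = true
              then some x else some m) := by
      cases acc with
      | none => rfl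
      | some a =>
        simp only [Option.map_some]
        split_ifs <;> rfl
    rw [hstep, ih]

theorem pv_foldl_swap (L : List (Char × Int)) :
    L.foldl (fun d p => d.modify p.2 ([] : List Char) (fun l => l ++ [p.1]))
        (PySem.Dict.empty : PySem.Dict Int (List Char))
      = (L.map (fun p => (p.2, p.1))).foldl
          (fun d p => d.modify p.1 ([] : List Char) (fun l => l ++ [p.2]))
          (PySem.Dict.empty : PySem.Dict Int (List Char)) := by
  rw [List.foldl_map]

-- the items of A's groups dict: first-occurrence-ordered frequencies, each with its char list
theorem pv_groups_items (L : List (Char × Int)) :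
    (L.foldl (fun d p => d.modify p.2 ([] : List Char) (fun l => l ++ [p.1]))
        (PySem.Dict.empty : PySem.Dict Int (List Char))).items
      = (PySem.Set.ofList (L.map (fun p => p.2))).map
          (fun c => (c, (L.filter (fun p => p.2 == c)).map (fun p => p.1))) := by
  have hkeys :
      (L.foldl (fun d p => d.modify p.2 ([] : List Char) (fun l => l ++ [p.1]))
          (PySem.Dict.empty : PySem.Dict Int (List Char))).keys
        = PySem.Set.ofList (L.map (fun p => p.2)) := by
    have := PySem.Dict.keys_foldl_modify_key L (fun p => p.2) ([] : List Char)
      (fun _ p => fun l => l ++ [p.1]) (PySem.Dict.empty : PySem.Dict Int (List Char))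
    simpa [PySem.Set.update_empty] using this
  have hnodup :
      (L.foldl (fun d p => d.modify p.2 ([] : List Char) (fun l => l ++ [p.1]))
          (PySem.Dict.empty : PySem.Dict Int (List Char))).keys.Nodup := by
    exact PySem.Dict.nodup_keys_foldl_modify_key L (fun p => p.2) ([] : List Char)
      (fun _ p => fun l => l ++ [p.1]) _ (by simp)
  have hgetD : ∀ c : Int,
      (L.foldl (fun d p => d.modify p.2 ([] : List Char) (fun l => l ++ [p.1]))
          (PySem.Dict.empty : PySem.Dict Int (List Char))).getD c []
        = (L.filter (fun p => p.2 == c)).map (fun p => p.1) := by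
    intro c
    rw [pv_foldl_swap]
    rw [PySem.Dict.getD_foldl_modify_append]
    simp [List.filter_map, Function.comp_def]
  rw [PySem.Dict.items_eq_map_keys _ hnodup ([] : List Char), hkeys]
  exact List.map_congr_left (fun c _ => by rw [hgetD c])

-- invariant of B's run-length scan over a processed (sorted) prefix p
def pvInv (p : List Int) (st : Int × Int × Int × Option Int) : Prop :=
  (∃ w, st.2.2.2 = some w ∧ w ∈ p ∧ (∀ x ∈ p, x ≤ w) ∧ st.2.2.1 = (p.count w : Int)) ∧
  st.1 ∈ p ∧ st.2.1 = (p.count st.1 : Int) ∧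
  ∀ v ∈ p, (p.count v : Int) < (p.count st.1 : Int) ∨
    ((p.count v : Int) = (p.count st.1 : Int) ∧ v ≤ st.1)

theorem pv_step_inv (p : List Int) (st : Int × Int × Int × Option Int) (v : Int)
    (hle : ∀ x ∈ p, x ≤ v) (hInv : pvInv p st) : pvInv (p ++ [v]) (pvStep st v) := by
  obtain ⟨⟨w, hprev, hwmem, hwmax, hrun⟩, hbmem, hblen, hdom⟩ := hInv
  have hcnt : ∀ u : Int, (p ++ [v]).count u = p.count u + if u = v then 1 else 0 := by
    intro u
    by_cases huv : u = v
    · subst huv; simp [List.count_append]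
    · simp [List.count_append, List.count_cons, huv]
      omega
  unfold pvStep
  rw [hprev]
  -- the new run value equals the count of v in the extended prefix
  have hrun' : (if (some w : Option Int) = some v then st.2.2.1 + 1 else 1)
      = ((p ++ [v]).count v : Int) := by
    by_cases hwv : w = v
    · subst hwv
      simp [hrun, hcnt w]
    · have hvp : v ∉ p := fun hv => hwv (le_antisymm (hle w hwmem) (hwmax v hv))
      simp [hwv, hcnt v, List.count_eq_zero_of_not_mem hvp]
  rw [hrun']
  by_cases hup : st.2.1 ≤ ((p ++ [v]).count v : Int)
  · -- best is replaced by v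
    rw [if_pos hup]
    refine ⟨⟨v, rfl, by simp, ?_, rfl⟩, by simp, rfl, ?_⟩
    · intro x hx
      rcases List.mem_append.1 hx with hx | hx
      · exact hle x hx
      · simp at hx; omega
    · intro u hu
      dsimp only
      by_cases huv : u = v
      · subst huv; omega
      · have hu' : u ∈ p := by
          rcases List.mem_append.1 hu with hu | hu
          · exact hu
          · simp at hu; exact absurd hu huv
        have h1 := hdom u hu'
        have h2 : (p ++ [v]).count u = p.count u := by simp [hcnt u, huv]
        have h3 : p.count st.1 ≤ (p ++ [v]).count v := by
          have := hcnt v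
          have hb := hblen
          omega
        have h4 : st.1 ≤ v := hle st.1 hbmem
        rw [h2]
        omega
  · -- best is kept
    rw [if_neg hup]
    have hbv : st.1 ≠ v := by
      intro hb
      have hvp : v ∈ p := hb ▸ hbmem
      have hwv : w = v := le_antisymm (hle w hwmem) (hwmax v hvp)
      rw [hcnt v] at hup
      rw [hb] at hblen
      simp at hup
      omega
    have hcb : (p ++ [v]).count st.1 = p.count st.1 := by simp [hcnt st.1, hbv]
    refine ⟨⟨v, rfl, by simp, ?_, rfl⟩, List.mem_append_left _ hbmem, by rw [hcb]; exact hblen, ?_⟩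
    · intro x hx
      rcases List.mem_append.1 hx with hx | hx
      · exact hle x hx
      · simp at hx; omega
    · intro u hu
      dsimp only
      by_cases huv : u = v
      · subst huv
        rw [hcb]
        omega
      · have hu' : u ∈ p := by
          rcases List.mem_append.1 hu with hu | hu
          · exact hu
          · simp at hu; exact absurd hu huv
        have h2 : (p ++ [v]).count u = p.count u := by simp [hcnt u, huv]
        have h1 := hdom u hu'
        rw [h2, hcb]
        omega

theorem pv_scan_aux (rest : List Int) : ∀ (p : List Int) (st : Int × Int × Int × Option Int),
    (p ++ rest).Pairwise (· ≤ ·) → pvInv p st → pvInv (p ++ rest) (rest.foldl pvStep st) := by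
  induction rest with
  | nil => intro p st _ h; simpa using h
  | cons v rest ih =>
    intro p st hpw hInv
    have hle : ∀ x ∈ p, x ≤ v :=
      fun x hx => (List.pairwise_append.1 hpw).2.2 x hx v List.mem_cons_self
    have h1 : pvInv (p ++ [v]) (pvStep st v) := pv_step_inv p st v hle hInv
    have h2 := ih (p ++ [v]) (pvStep st v) (by simpa [List.append_assoc] using hpw) h1
    simpa [List.append_assoc] using h2

theorem pv_scan (vs : List Int) (h : vs.Pairwise (· ≤ ·)) (hne : vs ≠ []) :
    pvInv vs (vs.foldl pvStep (0, 0, 0, (none : Option Int))) := by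
  cases vs with
  | nil => exact absurd rfl hne
  | cons v t =>
    have hbase : pvInv [v] (pvStep (0, 0, 0, (none : Option Int)) v) := by
      have hstep : pvStep (0, 0, 0, (none : Option Int)) v = (v, 1, 1, some v) := by
        simp [pvStep]
      rw [hstep]
      exact ⟨⟨v, rfl, by simp, by simp, by simp⟩, by simp, by simp, by simp⟩
    have := pv_scan_aux t [v] (pvStep (0, 0, 0, (none : Option Int)) v) (by simpa using h) hbase
    simpa using this

-- ===== VERDICT (by name: the statement is the Claim_ definition above) =====
theorem majority_frequency_group_spec : Claim_equal_majority_frequency_group := by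
  intro s _
  unfold Spec_majority_frequency_group majority_frequency_group majority_frequency_group_alt
  by_cases hs : s.toList = []
  · simp [hs]
  · simp only [hs, ite_false]
    set L := (PySem.Dict.counter s.toList).items with hL
    set vals := L.map (fun p => p.2) with hvals
    -- characterise A's groups dict and its max
    rw [pv_groups_items]
    rw [pv_max2?_map]
    have hLne : L ≠ [] := by
      rw [hL, PySem.Dict.items_counter]
      cases hcase : s.toList with
      | nil => exact absurd hcase hs
      | cons c cs =>
        have : c ∈ PySem.Set.ofList (c :: cs) := (PySem.Set.mem_ofList _ _).2 List.mem_cons_self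
        simp
        exact List.ne_nil_of_mem this
    have hvalsne : vals ≠ [] := by
      cases hc : L with
      | nil => exact absurd hc hLne
      | cons x t => simp [hvals, hc]
    have hdistne : PySem.Set.ofList vals ≠ [] := by
      cases hc : vals with
      | nil => exact absurd hc hvalsne
      | cons x t =>
        exact List.ne_nil_of_mem ((PySem.Set.mem_ofList (x :: t) x).2 List.mem_cons_self)
    obtain ⟨a, ha⟩ := pv_max2?_isSome (PySem.Set.ofList vals)
      (fun c => (((L.filter (fun p => p.2 == c)).map (fun p => p.1)).length : Int))
      (fun c => c) hdistne
    rw [ha]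
    simp only [Option.map_some]
    -- group sizes are counts of frequencies in vals
    have hlen : ∀ c : Int, ((L.filter (fun p => p.2 == c)).map (fun p => p.1)).length
        = vals.count c := by
      intro c
      simp [hvals, List.count_eq_countP, List.countP_eq_length_filter, List.filter_map,
        Function.comp_def]
    -- B's scan result
    have hvalues : (PySem.Dict.counter s.toList).values = vals := rfl
    rw [hvalues]
    set vs := PySem.List.sorted vals (fun v => v) false with hvs
    have hperm : vs.Perm vals := PySem.List.sorted_perm vals (fun v => v) false
    have hpw : vs.Pairwise (· ≤ ·) := PySem.List.sorted_pairwise vals (fun v => v)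
    have hvsne : vs ≠ [] := by
      intro hnil
      exact hvalsne ((hnil ▸ hperm).symm.eq_nil)
    obtain ⟨⟨w, _, _, _, _⟩, hbmem, _, hdomB⟩ := pv_scan vs hpw hvsne
    set b := (vs.foldl pvStep (0, 0, 0, (none : Option Int))).1 with hb
    -- the two selected frequencies coincide
    have hab : a = b := by
      have hbvals : b ∈ vals := hperm.mem_iff.1 hbmem
      have hAdom := pv_max2?_dom _ _ _ _ ha b ((PySem.Set.mem_ofList _ _).2 hbvals)
      have haset : a ∈ PySem.Set.ofList vals := pv_max2?_mem _ _ _ _ ha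
      have havals : a ∈ vals := (PySem.Set.mem_ofList _ _).1 haset
      have hBdom := hdomB a (hperm.mem_iff.2 havals)
      have hca : vs.count a = vals.count a := hperm.count_eq a
      have hcb : vs.count b = vals.count b := hperm.count_eq b
      rw [hlen a, hlen b] at hAdom
      rw [hca, hcb] at hBdom
      omega
    rw [hab]
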